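-- pv_equiv track=rewrite | github.com/Ikerlb/aoc2015 | 11/sol.py | has_two_pairs
-- ===== SOURCE A (Python) =====
-- def window(s, k):
--     for i in range(len(s) - (k - 1)):
--         yield s[i:i + k]
--
-- def has_two_pairs(arr):
--     p = pi = None
--     for i, w in enumerate(window(arr, 2)):
--         if w[0] != w[1]:
--             continue
--         if p is None:
--             pi, p = i, w
--         elif p != w or i - pi >= 2:
--             return True
--     return False
-- ===== SOURCE B (Python) =====
-- def has_two_pairs(arr):
--     idxs = [i for i in range(len(arr) - 1) if arr[i] == arr[i + 1]]
--     return len(idxs) > 0 and idxs[-1] - idxs[0] >= 2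
-- ===== Notes on version B (the rewrite author's own statement) =====
-- stated objective: alternative
-- what changed: A's stateful single-pass machine over a window generator (remembering the first pair's content and index, with early exit) is replaced by a two-phase B: one comprehension collecting all indices of equal adjacent pairs, then a single global test that the list is nonempty and last-first >= 2.
import Mathlib
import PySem

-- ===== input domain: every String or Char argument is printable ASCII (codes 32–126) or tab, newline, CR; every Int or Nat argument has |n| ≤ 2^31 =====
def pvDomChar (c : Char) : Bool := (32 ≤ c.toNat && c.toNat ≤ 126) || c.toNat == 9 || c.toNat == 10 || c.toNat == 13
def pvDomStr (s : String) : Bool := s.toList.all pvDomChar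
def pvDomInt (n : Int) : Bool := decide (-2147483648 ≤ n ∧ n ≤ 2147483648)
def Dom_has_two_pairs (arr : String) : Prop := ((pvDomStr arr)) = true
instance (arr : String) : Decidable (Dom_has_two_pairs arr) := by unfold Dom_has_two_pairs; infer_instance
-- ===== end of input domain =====

-- B replaces A's stateful scan (remembering the first pair's content and index, early exit) by a
-- two-phase check: collect all equal-pair start indices, then test last - first >= 2; same cost.

-- ===== PORT A =====
-- window(s, 2): the slices s[i:i+2] for i in range(len(s) - 1)
def pvWindows (s : List Char) : List (List Char) :=
  (PySem.List.pyRange 0 ((s.length : Int) - 1) 1).map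
    (fun i => PySem.List.slice s (some i) (some (i + 2)))

-- the for-loop of A: state p/pi is the Option (pi, p); early 'return True' = value true
def pvLoopA : List (Int × List Char) → Option (Int × List Char) → Bool
  | [], _ => false
  | (i, w) :: rest, st =>
    if PySem.List.pyGet? w 0 ≠ PySem.List.pyGet? w 1 then pvLoopA rest st
    else
      match st with
      | none => pvLoopA rest (some (i, w))
      | some (pi, p) => if p ≠ w ∨ i - pi ≥ 2 then true else pvLoopA rest st

def has_two_pairs (arr : String) : Bool :=
  pvLoopA (PySem.List.enumerate (pvWindows arr.toList) 0) none

-- ===== PORT B =====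
def has_two_pairs_alt (arr : String) : Bool :=
  let l := arr.toList
  let idxs := (PySem.List.pyRange 0 ((l.length : Int) - 1) 1).filter
    (fun i => PySem.List.pyGetD l i ' ' == PySem.List.pyGetD l (i + 1) ' ')
  decide (0 < idxs.length) &&
    decide (PySem.List.pyGetD idxs (-1) 0 - PySem.List.pyGetD idxs 0 0 ≥ 2)

-- ===== PRECONDITION & SPEC =====
def Spec_has_two_pairs (arr : String) (out : Bool) : Prop := out = has_two_pairs_alt arr
instance (arr : String) (out : Bool) : Decidable (Spec_has_two_pairs arr out) := by unfold Spec_has_two_pairs; infer_instance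

-- ===== CLAIM (what is proved, stated in full; the proofs are below) =====
def Claim_equal_has_two_pairs : Prop := ∀ (arr : String), Dom_has_two_pairs arr → Spec_has_two_pairs arr (has_two_pairs arr)

-- ===== LEMMAS AND PROOFS =====

-- 'position i starts an equal pair', exactly B's filter predicate as a Prop
def pvP (l : List Char) (i : Int) : Prop :=
  PySem.List.pyGetD l i ' ' = PySem.List.pyGetD l (i + 1) ' '

-- an in-range window of width 2 is the two-element list of its characters
theorem pvSlice_pair (l : List Char) (i : Int) (h0 : 0 ≤ i) (h2 : i + 2 ≤ (l.length : Int)) :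
    PySem.List.slice l (some i) (some (i + 2))
      = [PySem.List.pyGetD l i ' ', PySem.List.pyGetD l (i + 1) ' '] := by
  obtain ⟨m, rfl⟩ : ∃ m : Nat, i = (m : Int) := ⟨i.toNat, by omega⟩
  have hm : m + 2 ≤ l.length := by exact_mod_cast h2
  rw [show (m : Int) + 1 = ((m + 1 : Nat) : Int) by push_cast; ring,
    show (m : Int) + 2 = ((m + 2 : Nat) : Int) by push_cast; ring,
    PySem.List.slice_natCast, PySem.List.pyGetD_natCast, PySem.List.pyGetD_natCast,
    List.getD_eq_getElem l ' ' (by omega), List.getD_eq_getElem l ' ' (by omega),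
    List.drop_eq_getElem_cons (show m < l.length by omega),
    List.drop_eq_getElem_cons (show m + 1 < l.length by omega),
    show m + 2 - m = 2 by omega]
  rfl

-- A's test 'w[0] != w[1]' on an in-range window says exactly 'not a pair here'
theorem pvTest_iff (l : List Char) (i : Int) (h0 : 0 ≤ i) (h2 : i + 2 ≤ (l.length : Int)) :
    (PySem.List.pyGet? (PySem.List.slice l (some i) (some (i + 2))) 0
      ≠ PySem.List.pyGet? (PySem.List.slice l (some i) (some (i + 2))) 1) ↔ ¬ pvP l i := by
  rw [pvSlice_pair l i h0 h2]
  simp [PySem.List.pyGet?, PySem.List.pyIdx?, pvP]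

-- two overlapping equal pairs have equal window content
theorem pvSlice_congr (l : List Char) (i : Int) (h0 : 0 ≤ i) (h3 : i + 3 ≤ (l.length : Int))
    (hp : pvP l i) (hp1 : pvP l (i + 1)) :
    PySem.List.slice l (some i) (some (i + 2))
      = PySem.List.slice l (some (i + 1)) (some (i + 1 + 2)) := by
  rw [pvSlice_pair l i h0 (by omega), pvSlice_pair l (i + 1) (by omega) (by omega)]
  unfold pvP at hp hp1
  rw [hp, hp1]

-- enumerate over windows indexed by an ascending unit range pairs each index with its window
theorem pvEnum (f : Int → List Char) (k : Nat) : ∀ (a : Int),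
    PySem.List.enumerate ((PySem.List.pyRange a (a + (k : Int)) 1).map f) a
      = (PySem.List.pyRange a (a + (k : Int)) 1).map (fun i => (i, f i)) := by
  induction k with
  | zero =>
    intro a
    rw [show a + ((0 : Nat) : Int) = a by simp, PySem.List.pyRange_one_eq_nil le_rfl]
    rfl
  | succ k ih =>
    intro a
    rw [PySem.List.pyRange_one_cons (show a < a + ((k + 1 : Nat) : Int) by push_cast; omega),
      show a + ((k + 1 : Nat) : Int) = (a + 1) + (k : Int) by push_cast; ring]
    simp only [List.map_cons, PySem.List.enumerate_cons]
    rw [ih (a + 1)]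

-- the loop after the first pair (pi, its window) has been stored:
-- it returns True iff some later pair starts at least 2 after pi
theorem pvLoop_some (l : List Char) (k : Nat) : ∀ (a pi : Int), 0 ≤ pi → pi + 1 ≤ a →
    a + (k : Int) ≤ (l.length : Int) - 1 → pvP l pi →
    (pvLoopA ((PySem.List.pyRange a (a + (k : Int)) 1).map
        (fun i => (i, PySem.List.slice l (some i) (some (i + 2)))))
        (some (pi, PySem.List.slice l (some pi) (some (pi + 2)))) = true
      ↔ ∃ i, a ≤ i ∧ i < a + (k : Int) ∧ pvP l i ∧ pi + 2 ≤ i) := by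
  induction k with
  | zero =>
    intro a pi _ _ _ _
    rw [show a + ((0 : Nat) : Int) = a by simp, PySem.List.pyRange_one_eq_nil le_rfl]
    simp only [List.map_nil, pvLoopA, Bool.false_eq_true, false_iff]
    rintro ⟨i, h1, h2, -, -⟩; omega
  | succ k ih =>
    intro a pi h0pi hpia hbound hPpi
    rw [PySem.List.pyRange_one_cons (show a < a + ((k + 1 : Nat) : Int) by push_cast; omega),
      show a + ((k + 1 : Nat) : Int) = (a + 1) + (k : Int) by push_cast; ring]
    have hb2 : a + 2 ≤ (l.length : Int) := by push_cast at hbound; omega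
    have h0a : (0 : Int) ≤ a := by omega
    simp only [List.map_cons, pvLoopA]
    by_cases hPa : pvP l a
    · rw [if_neg (fun hc => (pvTest_iff l a h0a hb2).mp hc hPa)]
      by_cases hge : pi + 2 ≤ a
      · rw [if_pos (Or.inr (by omega))]
        constructor
        · intro _; exact ⟨a, le_refl a, by omega, hPa, hge⟩
        · intro _; rfl
      · have ha : a = pi + 1 := by omega
        have hWeq : PySem.List.slice l (some pi) (some (pi + 2))
            = PySem.List.slice l (some a) (some (a + 2)) := by
          subst ha; exact pvSlice_congr l pi h0pi (by omega) hPpi hPa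
        rw [if_neg (not_or.mpr ⟨not_not_intro hWeq, by omega⟩)]
        rw [ih (a + 1) pi h0pi (by omega) (by push_cast at hbound ⊢; omega) hPpi]
        constructor
        · rintro ⟨i, h1, h2, h3, h4⟩; exact ⟨i, by omega, by omega, h3, h4⟩
        · rintro ⟨i, h1, h2, h3, h4⟩; exact ⟨i, by omega, by omega, h3, h4⟩
    · rw [if_pos ((pvTest_iff l a h0a hb2).mpr hPa)]
      rw [ih (a + 1) pi h0pi (by omega) (by push_cast at hbound ⊢; omega) hPpi]
      constructor
      · rintro ⟨i, h1, h2, h3, h4⟩; exact ⟨i, by omega, by omega, h3, h4⟩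
      · rintro ⟨i, h1, h2, h3, h4⟩
        have hne : i ≠ a := fun h => hPa (h ▸ h3)
        exact ⟨i, by omega, by omega, h3, h4⟩

-- the loop from the initial state: True iff two pairs at distance ≥ 2 exist in the range
theorem pvLoop_none (l : List Char) (k : Nat) : ∀ (a : Int), 0 ≤ a →
    a + (k : Int) ≤ (l.length : Int) - 1 →
    (pvLoopA ((PySem.List.pyRange a (a + (k : Int)) 1).map
        (fun i => (i, PySem.List.slice l (some i) (some (i + 2))))) none = true
      ↔ ∃ i j, a ≤ i ∧ i + 2 ≤ j ∧ j < a + (k : Int) ∧ pvP l i ∧ pvP l j) := by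
  induction k with
  | zero =>
    intro a _ _
    rw [show a + ((0 : Nat) : Int) = a by simp, PySem.List.pyRange_one_eq_nil le_rfl]
    simp only [List.map_nil, pvLoopA, Bool.false_eq_true, false_iff]
    rintro ⟨i, j, h1, h2, h3, -, -⟩; omega
  | succ k ih =>
    intro a h0a hbound
    rw [PySem.List.pyRange_one_cons (show a < a + ((k + 1 : Nat) : Int) by push_cast; omega),
      show a + ((k + 1 : Nat) : Int) = (a + 1) + (k : Int) by push_cast; ring]
    have hb2 : a + 2 ≤ (l.length : Int) := by push_cast at hbound; omega
    simp only [List.map_cons, pvLoopA]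
    by_cases hPa : pvP l a
    · rw [if_neg (fun hc => (pvTest_iff l a h0a hb2).mp hc hPa)]
      rw [pvLoop_some l k (a + 1) a h0a (by omega) (by push_cast at hbound ⊢; omega) hPa]
      constructor
      · rintro ⟨i, h1, h2, h3, h4⟩
        exact ⟨a, i, le_refl a, by omega, by omega, hPa, h3⟩
      · rintro ⟨i, j, h1, h2, h3, hPi, hPj⟩
        exact ⟨j, by omega, by omega, hPj, by omega⟩
    · rw [if_pos ((pvTest_iff l a h0a hb2).mpr hPa)]
      rw [ih (a + 1) (by omega) (by push_cast at hbound ⊢; omega)]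
      constructor
      · rintro ⟨i, j, h1, h2, h3, hPi, hPj⟩; exact ⟨i, j, by omega, h2, by omega, hPi, hPj⟩
      · rintro ⟨i, j, h1, h2, h3, hPi, hPj⟩
        have hne : i ≠ a := fun h => hPa (h ▸ hPi)
        exact ⟨i, j, by omega, h2, by omega, hPi, hPj⟩

-- characterisation of A: two equal pairs at distance ≥ 2 exist
theorem pvA_iff (arr : String) :
    has_two_pairs arr = true
      ↔ ∃ i j : Int, 0 ≤ i ∧ i + 2 ≤ j ∧ j < (arr.toList.length : Int) - 1
          ∧ pvP arr.toList i ∧ pvP arr.toList j := by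
  unfold has_two_pairs pvWindows
  by_cases hN : (arr.toList.length : Int) - 1 ≤ 0
  · rw [PySem.List.pyRange_one_eq_nil (by omega)]
    simp only [List.map_nil, PySem.List.enumerate_nil, pvLoopA, Bool.false_eq_true, false_iff]
    rintro ⟨i, j, h1, h2, h3, -, -⟩; omega
  · have hk : ((((arr.toList.length : Int) - 1).toNat : Int)) = (arr.toList.length : Int) - 1 := by
      omega
    rw [show PySem.List.pyRange 0 ((arr.toList.length : Int) - 1) 1
        = PySem.List.pyRange 0 (0 + ((((arr.toList.length : Int) - 1).toNat : Nat) : Int)) 1 by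
      rw [hk]; ring_nf]
    rw [pvEnum _ _ 0, pvLoop_none arr.toList _ 0 le_rfl (by omega)]
    constructor
    · rintro ⟨i, j, h1, h2, h3, hPi, hPj⟩; exact ⟨i, j, h1, h2, by omega, hPi, hPj⟩
    · rintro ⟨i, j, h1, h2, h3, hPi, hPj⟩; exact ⟨i, j, h1, h2, by omega, hPi, hPj⟩

-- a strictly increasing list: head is minimal, getLast is maximal
theorem pv_head_le {xs : List Int} (h : xs.Pairwise (· < ·)) {x : Int} (hx : x ∈ xs)
    (hne : xs ≠ []) : xs.head hne ≤ x := by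
  cases xs with
  | nil => simp at hne
  | cons a t =>
    simp only [List.head_cons]
    rcases List.mem_cons.mp hx with rfl | hm
    · exact le_refl _
    · exact le_of_lt ((List.pairwise_cons.mp h).1 x hm)

theorem pv_le_getLast {xs : List Int} (h : xs.Pairwise (· < ·)) {x : Int} (hx : x ∈ xs)
    (hne : xs ≠ []) : x ≤ xs.getLast hne := by
  induction xs with
  | nil => simp at hne
  | cons a t iht =>
    cases t with
    | nil => simp only [List.mem_singleton.mp hx, List.getLast_singleton]; exact le_refl _
    | cons b u =>
      rw [List.getLast_cons (by simp)]
      rcases List.mem_cons.mp hx with rfl | hm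
      · exact le_of_lt ((List.pairwise_cons.mp h).1 _ (List.getLast_mem (by simp)))
      · exact iht (List.pairwise_cons.mp h).2 hm (by simp)

-- characterisation of B: the same condition
theorem pvB_iff (arr : String) :
    has_two_pairs_alt arr = true
      ↔ ∃ i j : Int, 0 ≤ i ∧ i + 2 ≤ j ∧ j < (arr.toList.length : Int) - 1
          ∧ pvP arr.toList i ∧ pvP arr.toList j := by
  unfold has_two_pairs_alt
  simp only [Bool.and_eq_true, decide_eq_true_eq]
  have hmem : ∀ x : Int,
      x ∈ (PySem.List.pyRange 0 ((arr.toList.length : Int) - 1) 1).filter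
        (fun i => PySem.List.pyGetD arr.toList i ' ' == PySem.List.pyGetD arr.toList (i + 1) ' ')
      ↔ (0 ≤ x ∧ x < (arr.toList.length : Int) - 1) ∧ pvP arr.toList x := by
    intro x
    simp [List.mem_filter, PySem.List.mem_pyRange_one, pvP]
  have hpair : ((PySem.List.pyRange 0 ((arr.toList.length : Int) - 1) 1).filter
      (fun i => PySem.List.pyGetD arr.toList i ' ' == PySem.List.pyGetD arr.toList (i + 1) ' ')).Pairwise (· < ·) :=
    List.Pairwise.filter _ (PySem.List.pairwise_lt_pyRange_one 0 ((arr.toList.length : Int) - 1))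
  constructor
  · rintro ⟨hlen, hge⟩
    have hne : _ ≠ ([] : List Int) := List.ne_nil_of_length_pos hlen
    rw [PySem.List.pyGetD_neg_one _ _ hne, PySem.List.pyGetD_zero] at hge
    have hhead := (hmem _).mp (List.head_mem hne)
    have hlast := (hmem _).mp (List.getLast_mem hne)
    have hgd : (_ : List Int).getD 0 0 = _ := List.getD_eq_getElem _ 0 (by omega)
    rw [hgd, List.getElem_zero] at hge
    exact ⟨_, _, hhead.1.1, by omega, hlast.1.2, hhead.2, hlast.2⟩
  · rintro ⟨i, j, h0i, hij, hjN, hPi, hPj⟩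
    have hi : i ∈ _ := (hmem i).mpr ⟨⟨h0i, by omega⟩, hPi⟩
    have hj : j ∈ _ := (hmem j).mpr ⟨⟨by omega, hjN⟩, hPj⟩
    have hne : _ ≠ ([] : List Int) := List.ne_nil_of_mem hi
    refine ⟨List.length_pos_iff.mpr hne, ?_⟩
    rw [PySem.List.pyGetD_neg_one _ _ hne, PySem.List.pyGetD_zero,
      List.getD_eq_getElem _ 0 (List.length_pos_iff.mpr hne), List.getElem_zero]
    have h1 := pv_head_le hpair hi hne
    have h2 := pv_le_getLast hpair hj hne
    omega

-- ===== VERDICT (by name: the statement is the Claim_ definition above) =====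
theorem has_two_pairs_spec : Claim_equal_has_two_pairs := by
  intro arr _
  unfold Spec_has_two_pairs
  exact Bool.eq_iff_iff.mpr ((pvA_iff arr).trans (pvB_iff arr).symm)
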